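-- pv_equiv track=rewrite | github.com/scanfactory/scanfactory-to-defectdojo | src/utils.py | get_report_path
-- ===== SOURCE A (Python) =====
-- def get_report_path(reports: list[str]) -> str | None:
--     for report in reports:
--         if report.endswith(".xml"):
--             return report
--
--     for report in reports:
--         if report.endswith(".csv"):
--             return report
--     return None
-- ===== SOURCE B (Python) =====
-- def get_report_path(reports: list[str]) -> str | None:
--     first_csv = None
--     for report in reports:
--         if report.endswith(".xml"):
--             return report
--         elif report.endswith(".csv") and first_csv is None:
--             first_csv = report
--     return first_csv
-- ===== Notes on version B (the rewrite author's own statement) =====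
-- stated objective: alternative
-- what changed: Replaced A's two separate scans (first for .xml, then for .csv) with a single traversal that returns an .xml immediately and keeps the first .csv seen as a deferred candidate returned after the loop.
import Mathlib
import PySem

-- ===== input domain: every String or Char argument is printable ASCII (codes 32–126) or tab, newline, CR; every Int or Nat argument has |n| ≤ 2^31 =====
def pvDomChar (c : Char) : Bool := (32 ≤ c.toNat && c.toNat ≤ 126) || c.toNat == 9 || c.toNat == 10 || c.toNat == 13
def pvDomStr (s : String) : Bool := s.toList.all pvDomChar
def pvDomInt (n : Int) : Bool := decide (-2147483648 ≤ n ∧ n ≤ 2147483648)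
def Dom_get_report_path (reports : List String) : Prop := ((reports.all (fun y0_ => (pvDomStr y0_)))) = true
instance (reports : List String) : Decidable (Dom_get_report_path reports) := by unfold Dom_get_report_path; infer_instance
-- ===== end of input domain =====

-- B replaces A's two sequential scans by one pass holding a deferred first-.csv candidate (alternative decomposition, same cost).

-- ===== PORT A =====
-- first loop of A: return the first report ending in ".xml"
def pvScanXml (reports : List String) : Option String :=
  match reports with
  | [] => none
  | r :: rest => if PySem.Str.endswith r ".xml" then some r else pvScanXml rest

-- second loop of A: return the first report ending in ".csv"
def pvScanCsv (reports : List String) : Option String :=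
  match reports with
  | [] => none
  | r :: rest => if PySem.Str.endswith r ".csv" then some r else pvScanCsv rest

def get_report_path (reports : List String) : Option String :=
  match pvScanXml reports with
  | some r => some r
  | none => pvScanCsv reports

-- ===== PORT B =====
-- single pass over reports with the first_csv accumulator
def pvGoB (reports : List String) (firstCsv : Option String) : Option String :=
  match reports with
  | [] => firstCsv
  | r :: rest =>
    if PySem.Str.endswith r ".xml" then some r
    else if PySem.Str.endswith r ".csv" ∧ firstCsv = none then pvGoB rest (some r)
    else pvGoB rest firstCsv

def get_report_path_alt (reports : List String) : Option String :=
  pvGoB reports none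

-- ===== PRECONDITION & SPEC =====
def Spec_get_report_path (reports : List String) (out : Option String) : Prop := out = get_report_path_alt reports
instance (reports : List String) (out : Option String) : Decidable (Spec_get_report_path reports out) := by unfold Spec_get_report_path; infer_instance

-- ===== CLAIM (what is proved, stated in full; the proofs are below) =====
def Claim_equal_get_report_path : Prop := ∀ (reports : List String), Dom_get_report_path reports → Spec_get_report_path reports (get_report_path reports)

-- ===== LEMMAS AND PROOFS =====
-- invariant of B's loop: xml in the remainder wins, then the accumulator, then a csv in the remainder
theorem pvGoB_eq (reports : List String) (acc : Option String) :
    pvGoB reports acc =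
      match pvScanXml reports with
      | some r => some r
      | none => match acc with
        | some c => some c
        | none => pvScanCsv reports := by
  induction reports generalizing acc with
  | nil => cases acc <;> simp [pvGoB, pvScanXml, pvScanCsv]
  | cons r rest ih =>
    simp only [pvGoB, pvScanXml, pvScanCsv]
    by_cases hx : PySem.Chars.endswith r.toList ['.', 'x', 'm', 'l'] = true
    · simp [hx]
    · by_cases hc : PySem.Chars.endswith r.toList ['.', 'c', 's', 'v'] = true
      · cases acc <;> simp [hx, hc, ih]
      · cases acc <;> simp [hx, hc, ih]

-- ===== VERDICT (by name: the statement is the Claim_ definition above) =====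
theorem get_report_path_spec : Claim_equal_get_report_path := by
  intro reports _
  unfold Spec_get_report_path get_report_path get_report_path_alt
  rw [pvGoB_eq]
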